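-- pv_equiv track=rewrite | github.com/senthan-bala/python-learning | games/mine_sweeper.py | make_numbers
-- ===== SOURCE A (Python) =====
-- def make_numbers(map_squares, map_size):
--     for x in range(1, map_size + 1):
--         for y in range(1, map_size + 1):
--             mine_number = 0
--             label = str(x) + "," + str(y)
--             x1 = x + 1
--             x2 = x - 1
--             y1 = y + 1
--             y2 = y - 1
--             if x1 < map_size + 1:
--                 if map_squares[str(x1) + "," + str(y)]["mine"] == True:
--                     mine_number += 1
--             if y1 < map_size + 1:
--                 if map_squares[str(x) + "," + str(y1)]["mine"] == True:
--                     mine_number += 1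
--             if x2 > 0:
--                 if map_squares[str(x2) + "," + str(y)]["mine"] == True:
--                     mine_number += 1
--             if y2 > 0:
--                 if map_squares[str(x) + "," + str(y2)]["mine"] == True:
--                     mine_number += 1
--             if x1 < map_size + 1 and y1 < map_size + 1:
--                 if map_squares[str(x1) + "," + str(y1)]["mine"] == True:
--                     mine_number += 1
--             if x1 < map_size + 1 and y2 > 0:
--                 if map_squares[str(x1) + "," + str(y2)]["mine"] == True:
--                     mine_number += 1
--             if x2 > 0 and y1 < map_size + 1:
--                 if map_squares[str(x2) + "," + str(y1)]["mine"] == True: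
--                     mine_number += 1
--             if x2 > 0 and y2 > 0:
--                 if map_squares[str(x2) + "," + str(y2)]["mine"] == True:
--                     mine_number += 1
--             map_squares[label]["mines_near"] = mine_number
--     return map_squares
-- ===== SOURCE B (Python) =====
-- _OFFSETS = [(-1, -1), (-1, 0), (-1, 1), (0, -1), (0, 1), (1, -1), (1, 0), (1, 1)]
--
--
-- def make_numbers(map_squares, map_size):
--     # Scatter pass: each mine adds 1 to a counter keyed by the (x, y) of every
--     # in-bounds neighbour; then one write pass stores the counts.
--     counts = {}
--     for x in range(1, map_size + 1):
--         for y in range(1, map_size + 1):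
--             if map_squares[str(x) + "," + str(y)].get("mine") == True:
--                 for dx, dy in _OFFSETS:
--                     nx = x + dx
--                     ny = y + dy
--                     if 1 <= nx <= map_size and 1 <= ny <= map_size:
--                         counts[(nx, ny)] = counts.get((nx, ny), 0) + 1
--     for x in range(1, map_size + 1):
--         for y in range(1, map_size + 1):
--             map_squares[str(x) + "," + str(y)]["mines_near"] = counts.get((x, y), 0)
--     return map_squares
-- ===== Notes on version B (the rewrite author's own statement) =====
-- stated objective: alternative
-- what changed: B scatters each mine's contribution into a tuple-keyed counter over its in-bounds neighbours and then writes the counts in a separate second pass, instead of A's single pass where every cell gathers eight guarded neighbour lookups.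
import Mathlib
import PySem

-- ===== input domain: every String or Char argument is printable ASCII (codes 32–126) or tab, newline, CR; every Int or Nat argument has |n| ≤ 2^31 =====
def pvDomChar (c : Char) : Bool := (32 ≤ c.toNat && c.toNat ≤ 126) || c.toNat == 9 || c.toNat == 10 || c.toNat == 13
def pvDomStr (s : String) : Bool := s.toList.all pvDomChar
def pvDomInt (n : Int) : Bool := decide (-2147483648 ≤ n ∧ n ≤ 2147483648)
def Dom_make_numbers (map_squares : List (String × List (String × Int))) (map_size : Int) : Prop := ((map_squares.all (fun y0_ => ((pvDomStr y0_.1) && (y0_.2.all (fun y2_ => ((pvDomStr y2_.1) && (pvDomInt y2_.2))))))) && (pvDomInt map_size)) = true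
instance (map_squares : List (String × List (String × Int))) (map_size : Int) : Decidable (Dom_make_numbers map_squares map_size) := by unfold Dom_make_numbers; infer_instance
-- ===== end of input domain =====

-- B replaces A's per-cell gather of eight guarded neighbour lookups by a scatter pass into a
-- tuple-keyed counter followed by a separate write pass (alternative decomposition, same cost).
-- Both Pythons mutate map_squares in place; the equivalence proved is about the returned value.

-- ===== PORT A =====
-- str(x) + "," + str(y)
def pvLabel (x y : Int) : String := String.ofList (PySem.Int.toChars x ++ ',' :: PySem.Int.toChars y)

-- map_squares[str(x) + "," + str(y)]["mine"] == True for A (total form; Pre_ excludes A's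
-- KeyError inputs) and map_squares[str(x) + "," + str(y)].get("mine") == True for B (exact:
-- a missing "mine" gives None == True, i.e. False, and getD's default 0 ≠ 1 likewise)
def pvMine (m : PySem.Dict String (List (String × Int))) (x y : Int) : Int :=
  (PySem.Dict.mk (m.getD (pvLabel x y) [])).getD "mine" 0

-- map_squares[str(x) + "," + str(y)]["mines_near"] = v  (in-place update of the inner dict)
def pvSetNear (m : PySem.Dict String (List (String × Int))) (x y v : Int) :
    PySem.Dict String (List (String × Int)) :=
  m.modify (pvLabel x y) [] (fun d => ((PySem.Dict.mk d).insert "mines_near" v).items)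

-- the mine_number A accumulates for cell (x, y), reading the current dict m
def pvGather (map_size : Int) (m : PySem.Dict String (List (String × Int))) (x y : Int) : Int :=
  let x1 := x + 1
  let x2 := x - 1
  let y1 := y + 1
  let y2 := y - 1
  let n0 : Int := 0
  let n1 := if x1 < map_size + 1 then (if pvMine m x1 y = 1 then n0 + 1 else n0) else n0
  let n2 := if y1 < map_size + 1 then (if pvMine m x y1 = 1 then n1 + 1 else n1) else n1
  let n3 := if x2 > 0 then (if pvMine m x2 y = 1 then n2 + 1 else n2) else n2
  let n4 := if y2 > 0 then (if pvMine m x y2 = 1 then n3 + 1 else n3) else n3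
  let n5 := if x1 < map_size + 1 ∧ y1 < map_size + 1 then (if pvMine m x1 y1 = 1 then n4 + 1 else n4) else n4
  let n6 := if x1 < map_size + 1 ∧ y2 > 0 then (if pvMine m x1 y2 = 1 then n5 + 1 else n5) else n5
  let n7 := if x2 > 0 ∧ y1 < map_size + 1 then (if pvMine m x2 y1 = 1 then n6 + 1 else n6) else n6
  let n8 := if x2 > 0 ∧ y2 > 0 then (if pvMine m x2 y2 = 1 then n7 + 1 else n7) else n7
  n8

def make_numbers (map_squares : List (String × List (String × Int))) (map_size : Int) :
    List (String × List (String × Int)) :=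
  ((PySem.List.pyRange 1 (map_size + 1) 1).foldl (fun m x =>
    (PySem.List.pyRange 1 (map_size + 1) 1).foldl (fun m y =>
      pvSetNear m x y (pvGather map_size m x y)) m) (PySem.Dict.mk map_squares)).items

-- ===== PORT B =====
def pvOffsets : List (Int × Int) :=
  [(-1, -1), (-1, 0), (-1, 1), (0, -1), (0, 1), (1, -1), (1, 0), (1, 1)]

-- B's first (scatter) pass: the counter keyed by (x, y) pairs
def pvCounts (m0 : PySem.Dict String (List (String × Int))) (map_size : Int) :
    PySem.Dict (Int × Int) Int :=
  (PySem.List.pyRange 1 (map_size + 1) 1).foldl (fun c x =>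
    (PySem.List.pyRange 1 (map_size + 1) 1).foldl (fun c y =>
      if pvMine m0 x y = 1 then
        pvOffsets.foldl (fun c d =>
          let nx := x + d.1
          let ny := y + d.2
          if 1 ≤ nx ∧ nx ≤ map_size ∧ 1 ≤ ny ∧ ny ≤ map_size then
            c.modify (nx, ny) 0 (· + 1)
          else c) c
      else c) c) PySem.Dict.empty

def make_numbers_alt (map_squares : List (String × List (String × Int))) (map_size : Int) :
    List (String × List (String × Int)) :=
  ((PySem.List.pyRange 1 (map_size + 1) 1).foldl (fun m x =>
    (PySem.List.pyRange 1 (map_size + 1) 1).foldl (fun m y =>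
      pvSetNear m x y ((pvCounts (PySem.Dict.mk map_squares) map_size).getD (x, y) 0)) m)
    (PySem.Dict.mk map_squares)).items

-- ===== PRECONDITION & SPEC =====
-- Pre_ excludes exactly the inputs on which A raises KeyError: a grid cell whose "x,y" key is
-- missing from map_squares (read on assignment of mines_near), or, when map_size ≥ 2 — so that
-- every cell is some cell's neighbour and its "mine" entry is read — a cell lacking "mine".
-- The leading map_size * map_size ≤ length conjunct is implied by the key-presence requirement
-- (the map_size² labels are distinct), so it does not narrow Pre_; it only lets the condition
-- be decided quickly when map_size is far larger than the map.
def Pre_make_numbers (map_squares : List (String × List (String × Int))) (map_size : Int) : Prop :=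
  0 < map_size →
    map_size * map_size ≤ (map_squares.length : Int) ∧
    ∀ x ∈ PySem.List.pyRange 1 (map_size + 1) 1, ∀ y ∈ PySem.List.pyRange 1 (map_size + 1) 1,
      ((PySem.Dict.mk map_squares).get? (pvLabel x y)).isSome = true ∧
      (1 < map_size →
        (((PySem.Dict.mk map_squares).get? (pvLabel x y)).any
          (fun d => (PySem.Dict.mk d).contains "mine")) = true)
instance (map_squares : List (String × List (String × Int))) (map_size : Int) :
    Decidable (Pre_make_numbers map_squares map_size) := by
  unfold Pre_make_numbers; infer_instance

def pvWitness_make_numbers : (List (String × List (String × Int))) × Int :=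
  ([("1,1", [("mine", 1)])], 1)

def Spec_make_numbers (map_squares : List (String × List (String × Int))) (map_size : Int)
    (out : List (String × List (String × Int))) : Prop := out = make_numbers_alt map_squares map_size
instance (map_squares : List (String × List (String × Int))) (map_size : Int)
    (out : List (String × List (String × Int))) : Decidable (Spec_make_numbers map_squares map_size out) := by
  unfold Spec_make_numbers; infer_instance

-- ===== CLAIM (what is proved, stated in full; the proofs are below) =====
def Claim_equal_make_numbers : Prop := ∀ (map_squares : List (String × List (String × Int))) (map_size : Int), Dom_make_numbers map_squares map_size → Pre_make_numbers map_squares map_size → Spec_make_numbers map_squares map_size (make_numbers map_squares map_size)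

-- ===== LEMMAS AND PROOFS =====

-- the grid, row-major, exactly the order both write loops visit
def pvCells (N : Int) : List (Int × Int) :=
  (PySem.List.pyRange 1 (N + 1) 1).flatMap
    (fun x => (PySem.List.pyRange 1 (N + 1) 1).map (fun y => (x, y)))

-- the in-bounds neighbours B's scatter loop touches for a mine at (x, y)
def pvNbrs (N x y : Int) : List (Int × Int) :=
  pvOffsets.filterMap (fun d =>
    if 1 ≤ x + d.1 ∧ x + d.1 ≤ N ∧ 1 ≤ y + d.2 ∧ y + d.2 ≤ N then some (x + d.1, y + d.2) else none)

def pvScatter (m0 : PySem.Dict String (List (String × Int))) (N : Int) : List (Int × Int) :=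
  (pvCells N).flatMap (fun c => if pvMine m0 c.1 c.2 = 1 then pvNbrs N c.1 c.2 else [])

theorem pv_foldl2 {σ : Type} (f : σ → Int → Int → σ) (xs ys : List Int) (init : σ) :
    xs.foldl (fun s x => ys.foldl (fun s y => f s x y) s) init
      = (xs.flatMap (fun x => ys.map (fun y => (x, y)))).foldl (fun s c => f s c.1 c.2) init := by
  induction xs generalizing init with
  | nil => rfl
  | cons a t ih => simp [List.foldl_append, List.foldl_map, ih]

theorem pv_foldl_foldl_flatMap {α β σ : Type} (g : α → List β) (h : σ → β → σ)
    (l : List α) (init : σ) :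
    l.foldl (fun s a => (g a).foldl h s) init = (l.flatMap g).foldl h init := by
  induction l generalizing init with
  | nil => rfl
  | cons a t ih => simp [List.foldl_append, ih]

theorem pv_foldl_if_filterMap {α β σ : Type} (p : α → Prop) [DecidablePred p] (key : α → β)
    (f : σ → β → σ) (l : List α) (s : σ) :
    l.foldl (fun s a => if p a then f s (key a) else s) s
      = (l.filterMap (fun a => if p a then some (key a) else none)).foldl f s := by
  induction l generalizing s with
  | nil => rfl
  | cons a t ih => by_cases h : p a <;> simp [h, ih]

theorem pvMine_setNear (m : PySem.Dict String (List (String × Int))) (a b v x y : Int) :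
    pvMine (pvSetNear m a b v) x y = pvMine m x y := by
  unfold pvMine pvSetNear
  rw [PySem.Dict.getD_modify]
  split_ifs with h
  · rw [h]
    exact PySem.Dict.getD_insert_of_ne _ _ _ (by decide)
  · rfl

theorem pvGather_congr (N : Int) (m m' : PySem.Dict String (List (String × Int)))
    (h : ∀ a b, pvMine m a b = pvMine m' a b) (x y : Int) :
    pvGather N m x y = pvGather N m' x y := by
  simp only [pvGather, h]

theorem pv_purify (N : Int) (m0 : PySem.Dict String (List (String × Int)))
    (L : List (Int × Int)) :
    ∀ (m1 : PySem.Dict String (List (String × Int))),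
      (∀ a b, pvMine m1 a b = pvMine m0 a b) →
      L.foldl (fun s c => pvSetNear s c.1 c.2 (pvGather N s c.1 c.2)) m1
        = L.foldl (fun s c => pvSetNear s c.1 c.2 (pvGather N m0 c.1 c.2)) m1 := by
  induction L with
  | nil => intro m1 _; rfl
  | cons c t ih =>
      intro m1 h1
      simp only [List.foldl_cons]
      rw [pvGather_congr N m1 m0 h1]
      exact ih _ (fun a b => (pvMine_setNear m1 c.1 c.2 _ a b).trans (h1 a b))

theorem pv_count_flatMap {α : Type} (l : List α) (g : α → List (Int × Int)) (k : Int × Int) :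
    (((l.flatMap g).count k : Int)) = (l.map (fun a => ((g a).count k : Int))).sum := by
  induction l with
  | nil => simp
  | cons a t ih =>
      simp only [List.flatMap_cons, List.count_append, List.map_cons, List.sum_cons, ← ih]
      push_cast
      ring

theorem pv_ind_congr {P Q : Prop} [Decidable P] [Decidable Q] (h : P ↔ Q) :
    (if P then (1 : Int) else 0) = if Q then 1 else 0 := by
  simp [h]

theorem pv_count_filterMap_ite {α : Type} (p : α → Prop) [DecidablePred p]
    (key : α → Int × Int) (l : List α) (k : Int × Int) :
    (((l.filterMap (fun a => if p a then some (key a) else none)).count k : Int))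
      = (l.map (fun a => if p a ∧ key a = k then (1 : Int) else 0)).sum := by
  induction l with
  | nil => simp
  | cons a t ih =>
      by_cases hp : p a
      · by_cases hk : key a = k
        · simp only [List.filterMap_cons, if_pos hp, List.count_cons, List.map_cons,
            List.sum_cons, if_pos (And.intro hp hk), ← ih]
          simp [hk]
          ring
        · have : ¬ (p a ∧ key a = k) := fun hh => hk hh.2
          simp only [List.filterMap_cons, if_pos hp, List.count_cons, List.map_cons,
            List.sum_cons, if_neg this, ← ih]
          simp [hk]
      · simp [hp, ih]

theorem pv_sum_swap {α β : Type} (l : List α) (l' : List β) (g : α → β → Int) :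
    (l.map (fun a => (l'.map (g a)).sum)).sum
      = (l'.map (fun b => (l.map (fun a => g a b)).sum)).sum := by
  induction l with
  | nil => simp
  | cons a t ih =>
      simp only [List.map_cons, List.sum_cons, ih, ← PySem.List.sum_map_add_int]

theorem pv_mem_cells (N u v : Int) : (u, v) ∈ pvCells N ↔ 1 ≤ u ∧ u ≤ N ∧ 1 ≤ v ∧ v ≤ N := by
  show (u, v) ∈ (PySem.List.pyRange 1 (N + 1) 1) ×ˢ (PySem.List.pyRange 1 (N + 1) 1) ↔ _
  rw [List.mem_product]
  simp only [PySem.List.mem_pyRange_one]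
  omega

theorem pv_nodup_cells (N : Int) : (pvCells N).Nodup :=
  List.Nodup.product (PySem.List.nodup_pyRange_one _ _) (PySem.List.nodup_pyRange_one _ _)

-- sum over all cells of "this cell is a mine whose (d1, d2)-shifted image is (x, y)"
theorem pv_sum_cell (m0 : PySem.Dict String (List (String × Int))) (N x y d1 d2 : Int)
    (hx : 1 ≤ x ∧ x ≤ N) (hy : 1 ≤ y ∧ y ≤ N) :
    ((pvCells N).map (fun c =>
        if pvMine m0 c.1 c.2 = 1 ∧ (1 ≤ c.1 + d1 ∧ c.1 + d1 ≤ N ∧ 1 ≤ c.2 + d2 ∧ c.2 + d2 ≤ N)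
            ∧ (c.1 + d1, c.2 + d2) = (x, y) then (1 : Int) else 0)).sum
      = if (1 ≤ x - d1 ∧ x - d1 ≤ N ∧ 1 ≤ y - d2 ∧ y - d2 ≤ N)
            ∧ pvMine m0 (x - d1) (y - d2) = 1 then 1 else 0 := by
  have hfun : ∀ c ∈ pvCells N,
      (if pvMine m0 c.1 c.2 = 1 ∧ (1 ≤ c.1 + d1 ∧ c.1 + d1 ≤ N ∧ 1 ≤ c.2 + d2 ∧ c.2 + d2 ≤ N)
          ∧ (c.1 + d1, c.2 + d2) = (x, y) then (1 : Int) else 0)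
        = (if c = (x - d1, y - d2) ∧ pvMine m0 (x - d1) (y - d2) = 1 then (1 : Int) else 0) := by
    rintro ⟨cx, cy⟩ _
    apply pv_ind_congr
    constructor
    · rintro ⟨hm, _, heq⟩
      rw [Prod.mk.injEq] at heq
      have h1 : cx = x - d1 := by omega
      have h2 : cy = y - d2 := by omega
      subst h1; subst h2
      exact ⟨rfl, hm⟩
    · rintro ⟨heq, hm⟩
      rw [Prod.mk.injEq] at heq
      obtain ⟨h1, h2⟩ := heq
      subst h1; subst h2
      refine ⟨hm, by omega, by rw [Prod.mk.injEq]; omega⟩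
  rw [List.map_congr_left hfun]
  by_cases hm : pvMine m0 (x - d1) (y - d2) = 1
  · simp only [hm, and_true]
    have h2 : ∀ c ∈ pvCells N,
        (if c = (x - d1, y - d2) then (1 : Int) else 0)
          = (if ((c : Int × Int) == (x - d1, y - d2)) = true then (1 : Int) else 0) := by
      intro c _; simp [beq_iff_eq]
    rw [List.map_congr_left h2, PySem.List.sum_map_ite_one_zero]
    have hcp : (pvCells N).countP (fun c => c == (x - d1, y - d2)) = (pvCells N).count (x - d1, y - d2) := rfl
    rw [hcp]
    by_cases hmem : ((x - d1, y - d2) : Int × Int) ∈ pvCells N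
    · rw [List.count_eq_one_of_mem (pv_nodup_cells N) hmem]
      rw [pv_mem_cells] at hmem
      simp [hmem]
    · rw [List.count_eq_zero_of_not_mem hmem]
      rw [pv_mem_cells] at hmem
      simp only [if_neg (fun h => hmem h)]
      rfl
  · have h3 : ∀ c ∈ pvCells N,
        (if c = (x - d1, y - d2) ∧ pvMine m0 (x - d1) (y - d2) = 1 then (1 : Int) else 0) = 0 := by
      intro c _; simp [hm]
    rw [List.map_congr_left h3]
    simp [hm]

-- B's counter, read at any key, is the multiplicity of that key in the scatter list
theorem pv_counts_getD (m0 : PySem.Dict String (List (String × Int))) (N : Int) (k : Int × Int) :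
    (pvCounts m0 N).getD k 0 = ((pvScatter m0 N).count k : Int) := by
  have h1 : pvCounts m0 N
      = (pvCells N).foldl (fun c p =>
          if pvMine m0 p.1 p.2 = 1 then
            pvOffsets.foldl (fun c d =>
              if 1 ≤ p.1 + d.1 ∧ p.1 + d.1 ≤ N ∧ 1 ≤ p.2 + d.2 ∧ p.2 + d.2 ≤ N then
                c.modify (p.1 + d.1, p.2 + d.2) 0 (· + 1)
              else c) c
          else c) PySem.Dict.empty :=
    pv_foldl2 (fun (c : PySem.Dict (Int × Int) Int) (a b : Int) =>
      if pvMine m0 a b = 1 then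
        pvOffsets.foldl (fun (c : PySem.Dict (Int × Int) Int) (d : Int × Int) =>
          if 1 ≤ a + d.1 ∧ a + d.1 ≤ N ∧ 1 ≤ b + d.2 ∧ b + d.2 ≤ N then
            c.modify (a + d.1, b + d.2) 0 (· + 1)
          else c) c
      else c) _ _ _
  have h2 : ∀ (c : PySem.Dict (Int × Int) Int) (p : Int × Int),
      (if pvMine m0 p.1 p.2 = 1 then
        pvOffsets.foldl (fun c d =>
          if 1 ≤ p.1 + d.1 ∧ p.1 + d.1 ≤ N ∧ 1 ≤ p.2 + d.2 ∧ p.2 + d.2 ≤ N then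
            c.modify (p.1 + d.1, p.2 + d.2) 0 (· + 1)
          else c) c
      else c)
      = ((if pvMine m0 p.1 p.2 = 1 then pvNbrs N p.1 p.2 else []).foldl
          (fun c k => c.modify k 0 (· + 1)) c) := by
    intro c p
    by_cases hm : pvMine m0 p.1 p.2 = 1
    · simp only [hm, if_pos]
      exact pv_foldl_if_filterMap
        (fun d => 1 ≤ p.1 + d.1 ∧ p.1 + d.1 ≤ N ∧ 1 ≤ p.2 + d.2 ∧ p.2 + d.2 ≤ N)
        (fun d => (p.1 + d.1, p.2 + d.2))
        (fun (c : PySem.Dict (Int × Int) Int) (k : Int × Int) => c.modify k 0 (· + 1)) pvOffsets c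
    · simp [hm]
  rw [h1]
  rw [show (fun (c : PySem.Dict (Int × Int) Int) (p : Int × Int) =>
      if pvMine m0 p.1 p.2 = 1 then
        pvOffsets.foldl (fun c d =>
          if 1 ≤ p.1 + d.1 ∧ p.1 + d.1 ≤ N ∧ 1 ≤ p.2 + d.2 ∧ p.2 + d.2 ≤ N then
            c.modify (p.1 + d.1, p.2 + d.2) 0 (· + 1)
          else c) c
      else c) = (fun c p => (if pvMine m0 p.1 p.2 = 1 then pvNbrs N p.1 p.2 else []).foldl
          (fun c k => c.modify k 0 (· + 1)) c) from funext fun c => funext fun p => h2 c p]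
  rw [pv_foldl_foldl_flatMap]
  rw [show ((pvCells N).flatMap fun p => if pvMine m0 p.1 p.2 = 1 then pvNbrs N p.1 p.2 else []) = pvScatter m0 N from rfl]
  rw [PySem.Dict.getD_foldl_modify_add_one]
  simp [PySem.Dict.getD_empty]

-- the multiplicity of (x, y) in the scatter list is exactly A's gathered mine_number

theorem pv_step_ite (P Q : Prop) [Decidable P] [Decidable Q] (n : Int) :
    (if P then (if Q then n + 1 else n) else n) = n + (if P ∧ Q then 1 else 0) := by
  split_ifs <;> simp_all

theorem pv_scatter_gather (m0 : PySem.Dict String (List (String × Int))) (N x y : Int)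
    (hx : 1 ≤ x ∧ x ≤ N) (hy : 1 ≤ y ∧ y ≤ N) :
    ((pvScatter m0 N).count (x, y) : Int) = pvGather N m0 x y := by
  rw [pvScatter, pv_count_flatMap]
  have hcell : ∀ c ∈ pvCells N,
      (((if pvMine m0 c.1 c.2 = 1 then pvNbrs N c.1 c.2 else []).count (x, y) : Int))
        = (pvOffsets.map (fun d => if pvMine m0 c.1 c.2 = 1 ∧ (1 ≤ c.1 + d.1 ∧ c.1 + d.1 ≤ N ∧ 1 ≤ c.2 + d.2 ∧ c.2 + d.2 ≤ N) ∧ (c.1 + d.1, c.2 + d.2) = (x, y) then (1 : Int) else 0)).sum := by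
    intro c _
    by_cases hm : pvMine m0 c.1 c.2 = 1
    · rw [if_pos hm, pvNbrs, pv_count_filterMap_ite]
      refine congrArg List.sum (List.map_congr_left ?_)
      intro d _
      exact pv_ind_congr (by
        constructor
        · rintro ⟨hp, hk⟩; exact ⟨hm, hp, hk⟩
        · rintro ⟨_, hp, hk⟩; exact ⟨hp, hk⟩)
    · have hz : ∀ d ∈ pvOffsets, (if pvMine m0 c.1 c.2 = 1 ∧ (1 ≤ c.1 + d.1 ∧ c.1 + d.1 ≤ N ∧ 1 ≤ c.2 + d.2 ∧ c.2 + d.2 ≤ N) ∧ (c.1 + d.1, c.2 + d.2) = (x, y) then (1 : Int) else 0) = 0 := by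
        intro d _; simp [hm]
      rw [if_neg hm, List.map_congr_left hz]
      simp
  rw [List.map_congr_left hcell]
  have hswap : ((pvCells N).map (fun c => (pvOffsets.map (fun d => if pvMine m0 c.1 c.2 = 1 ∧ (1 ≤ c.1 + d.1 ∧ c.1 + d.1 ≤ N ∧ 1 ≤ c.2 + d.2 ∧ c.2 + d.2 ≤ N) ∧ (c.1 + d.1, c.2 + d.2) = (x, y) then (1 : Int) else 0)).sum)).sum
      = (pvOffsets.map (fun d => ((pvCells N).map (fun c => if pvMine m0 c.1 c.2 = 1 ∧ (1 ≤ c.1 + d.1 ∧ c.1 + d.1 ≤ N ∧ 1 ≤ c.2 + d.2 ∧ c.2 + d.2 ≤ N) ∧ (c.1 + d.1, c.2 + d.2) = (x, y) then (1 : Int) else 0)).sum)).sum :=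
    pv_sum_swap (pvCells N) pvOffsets (fun c d => if pvMine m0 c.1 c.2 = 1 ∧ (1 ≤ c.1 + d.1 ∧ c.1 + d.1 ≤ N ∧ 1 ≤ c.2 + d.2 ∧ c.2 + d.2 ≤ N) ∧ (c.1 + d.1, c.2 + d.2) = (x, y) then (1 : Int) else 0)
  rw [hswap]
  simp only [pvOffsets, List.map_cons, List.map_nil, List.sum_cons, List.sum_nil]
  rw [pv_sum_cell m0 N x y (-1) (-1) hx hy]
  rw [pv_sum_cell m0 N x y (-1) (0) hx hy]
  rw [pv_sum_cell m0 N x y (-1) (1) hx hy]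
  rw [pv_sum_cell m0 N x y (0) (-1) hx hy]
  rw [pv_sum_cell m0 N x y (0) (1) hx hy]
  rw [pv_sum_cell m0 N x y (1) (-1) hx hy]
  rw [pv_sum_cell m0 N x y (1) (0) hx hy]
  rw [pv_sum_cell m0 N x y (1) (1) hx hy]
  simp only [sub_neg_eq_add, sub_zero]
  simp only [pvGather]
  rw [pv_step_ite, pv_step_ite, pv_step_ite, pv_step_ite, pv_step_ite, pv_step_ite, pv_step_ite, pv_step_ite]
  rw [show (if (1 ≤ x + 1 ∧ x + 1 ≤ N ∧ 1 ≤ y + 1 ∧ y + 1 ≤ N) ∧ pvMine m0 (x + 1) (y + 1) = 1 then (1:Int) else 0) = (if (x + 1 < N + 1 ∧ y + 1 < N + 1) ∧ pvMine m0 (x + 1) (y + 1) = 1 then (1:Int) else 0) from pv_ind_congr (and_congr_left' (by omega))]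
  rw [show (if (1 ≤ x + 1 ∧ x + 1 ≤ N ∧ 1 ≤ y ∧ y ≤ N) ∧ pvMine m0 (x + 1) y = 1 then (1:Int) else 0) = (if x + 1 < N + 1 ∧ pvMine m0 (x + 1) y = 1 then (1:Int) else 0) from pv_ind_congr (and_congr_left' (by omega))]
  rw [show (if (1 ≤ x + 1 ∧ x + 1 ≤ N ∧ 1 ≤ y - 1 ∧ y - 1 ≤ N) ∧ pvMine m0 (x + 1) (y - 1) = 1 then (1:Int) else 0) = (if (x + 1 < N + 1 ∧ y - 1 > 0) ∧ pvMine m0 (x + 1) (y - 1) = 1 then (1:Int) else 0) from pv_ind_congr (and_congr_left' (by omega))]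
  rw [show (if (1 ≤ x ∧ x ≤ N ∧ 1 ≤ y + 1 ∧ y + 1 ≤ N) ∧ pvMine m0 x (y + 1) = 1 then (1:Int) else 0) = (if y + 1 < N + 1 ∧ pvMine m0 x (y + 1) = 1 then (1:Int) else 0) from pv_ind_congr (and_congr_left' (by omega))]
  rw [show (if (1 ≤ x ∧ x ≤ N ∧ 1 ≤ y - 1 ∧ y - 1 ≤ N) ∧ pvMine m0 x (y - 1) = 1 then (1:Int) else 0) = (if y - 1 > 0 ∧ pvMine m0 x (y - 1) = 1 then (1:Int) else 0) from pv_ind_congr (and_congr_left' (by omega))]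
  rw [show (if (1 ≤ x - 1 ∧ x - 1 ≤ N ∧ 1 ≤ y + 1 ∧ y + 1 ≤ N) ∧ pvMine m0 (x - 1) (y + 1) = 1 then (1:Int) else 0) = (if (x - 1 > 0 ∧ y + 1 < N + 1) ∧ pvMine m0 (x - 1) (y + 1) = 1 then (1:Int) else 0) from pv_ind_congr (and_congr_left' (by omega))]
  rw [show (if (1 ≤ x - 1 ∧ x - 1 ≤ N ∧ 1 ≤ y ∧ y ≤ N) ∧ pvMine m0 (x - 1) y = 1 then (1:Int) else 0) = (if x - 1 > 0 ∧ pvMine m0 (x - 1) y = 1 then (1:Int) else 0) from pv_ind_congr (and_congr_left' (by omega))]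
  rw [show (if (1 ≤ x - 1 ∧ x - 1 ≤ N ∧ 1 ≤ y - 1 ∧ y - 1 ≤ N) ∧ pvMine m0 (x - 1) (y - 1) = 1 then (1:Int) else 0) = (if (x - 1 > 0 ∧ y - 1 > 0) ∧ pvMine m0 (x - 1) (y - 1) = 1 then (1:Int) else 0) from pv_ind_congr (and_congr_left' (by omega))]
  ring

theorem pv_main (ms : List (String × List (String × Int))) (N : Int) :
    make_numbers ms N = make_numbers_alt ms N := by
  unfold make_numbers make_numbers_alt
  have hA : ((PySem.List.pyRange 1 (N + 1) 1).foldl (fun m x =>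
      (PySem.List.pyRange 1 (N + 1) 1).foldl (fun m y =>
        pvSetNear m x y (pvGather N m x y)) m) (PySem.Dict.mk ms))
      = (pvCells N).foldl (fun s c => pvSetNear s c.1 c.2 (pvGather N s c.1 c.2)) (PySem.Dict.mk ms) :=
    pv_foldl2 (fun s a b => pvSetNear s a b (pvGather N s a b)) _ _ _
  have hB : ((PySem.List.pyRange 1 (N + 1) 1).foldl (fun m x =>
      (PySem.List.pyRange 1 (N + 1) 1).foldl (fun m y =>
        pvSetNear m x y ((pvCounts (PySem.Dict.mk ms) N).getD (x, y) 0)) m) (PySem.Dict.mk ms))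
      = (pvCells N).foldl (fun s c =>
          pvSetNear s c.1 c.2 ((pvCounts (PySem.Dict.mk ms) N).getD (c.1, c.2) 0)) (PySem.Dict.mk ms) :=
    pv_foldl2 (fun s a b => pvSetNear s a b ((pvCounts (PySem.Dict.mk ms) N).getD (a, b) 0)) _ _ _
  rw [hA, hB, pv_purify N (PySem.Dict.mk ms) (pvCells N) (PySem.Dict.mk ms) (fun _ _ => rfl)]
  congr 1
  apply PySem.List.foldl_congr_mem
  intro acc c hc
  obtain ⟨a, b⟩ := c
  have hab := (pv_mem_cells N a b).mp hc
  rw [pv_counts_getD, pv_scatter_gather (PySem.Dict.mk ms) N a b ⟨hab.1, hab.2.1⟩ ⟨hab.2.2.1, hab.2.2.2⟩]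

-- ===== VERDICT (by name: the statement is the Claim_ definition above) =====
theorem make_numbers_spec : Claim_equal_make_numbers := by
  intro ms N _ _
  show make_numbers ms N = make_numbers_alt ms N
  exact pv_main ms N
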